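-- pv_equiv track=rewrite | github.com/Interventional-Genomics-Unit/IGU_CHANGEseq | changeseq/utility.py | copy_control_samples
-- ===== SOURCE A (Python) =====
-- def copy_control_samples(samples):
--     # changeseq is built to run every control with every sample except, usually theres only one control for all samples
--     # ro by pass this just copy one control for all
--     representative_controls = {}
--     controlreads = {}
--     for sample, info in samples.items():
--         if samples[sample]['controlread1'] not in controlreads.keys():
--             controlreads[samples[sample]['controlread1']] = []
--         controlreads[samples[sample]['controlread1']].append(sample)
--     for controlread, samples in controlreads.items():
--         representative = samples[0]
--         for s in samples:
--             representative_controls[s] = representative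
--     return representative_controls
-- ===== SOURCE B (Python) =====
-- def copy_control_samples(samples):
--     # one pass over items; for each control read seen for the first time,
--     # emit the whole group at once by rescanning the items
--     items = list(samples.items())
--     representative_controls = {}
--     seen = set()
--     for sample, info in items:
--         cr = info['controlread1']
--         if cr in seen:
--             continue
--         seen.add(cr)
--         for s2, info2 in items:
--             if info2['controlread1'] == cr:
--                 representative_controls[s2] = sample
--     return representative_controls
-- ===== Notes on version B (the rewrite author's own statement) =====
-- stated objective: alternative
-- what changed: B drops A's intermediate control-read-to-sample-list grouping dict and its second loop: one pass over the items with a set of already-handled control reads, emitting each whole group (keyed to its first sample) by a rescan of the items the first time its control read appears.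
import Mathlib
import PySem

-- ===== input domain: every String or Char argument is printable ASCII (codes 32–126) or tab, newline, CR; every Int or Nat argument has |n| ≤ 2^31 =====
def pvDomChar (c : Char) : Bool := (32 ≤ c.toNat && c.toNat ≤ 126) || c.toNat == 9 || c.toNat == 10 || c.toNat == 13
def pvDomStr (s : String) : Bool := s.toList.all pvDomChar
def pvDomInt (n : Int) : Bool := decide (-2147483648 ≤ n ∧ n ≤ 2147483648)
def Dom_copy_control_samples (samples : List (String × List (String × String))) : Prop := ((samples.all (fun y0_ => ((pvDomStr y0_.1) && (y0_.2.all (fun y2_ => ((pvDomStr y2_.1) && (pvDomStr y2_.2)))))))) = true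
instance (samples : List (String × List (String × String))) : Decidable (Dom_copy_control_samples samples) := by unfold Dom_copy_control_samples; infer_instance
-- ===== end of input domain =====

-- B replaces A's intermediate control-read→sample-list grouping dict and second loop by a single
-- pass that, on each first-seen control read, emits its whole group via a rescan of the items
-- (objective: alternative decomposition; same return value, no speed claim).


-- ===== PORT A =====
-- Literal port of A: group the samples by samples[sample]['controlread1'] into `controlreads`
-- (the `if key not in …: …[key] = []` guard, then append), then a second loop over the groups
-- inserting every member ↦ group[0].  Dict lookups that would raise KeyError in Python use a
-- default here; Pre_ excludes exactly those inputs.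
def copy_control_samples (samples : List (String × List (String × String))) : List (String × String) :=
  let samplesD : PySem.Dict String (List (String × String)) := PySem.Dict.ofList samples
  let controlreads : PySem.Dict String (List String) :=
    samples.foldl (fun cr p =>
      let key := (PySem.Dict.ofList (samplesD.getD p.1 [])).getD "controlread1" ""
      let cr := if cr.contains key then cr else cr.insert key []
      cr.modify key [] (fun g => g ++ [p.1])) PySem.Dict.empty
  let representative_controls : PySem.Dict String String :=
    controlreads.items.foldl (fun rc q =>
      let representative := PySem.List.pyGetD q.2 0 ""
      q.2.foldl (fun rc s => rc.insert s representative) rc) PySem.Dict.empty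
  representative_controls.items

-- ===== PORT B =====
-- Literal port of B (Source B): one pass with a seen-set of control reads; on each new control read,
-- rescan the items and insert every sample of that group mapped to the current (first) sample.
def copy_control_samples_alt (samples : List (String × List (String × String))) : List (String × String) :=
  let step := fun (st : PySem.Set String × PySem.Dict String String) (p : String × List (String × String)) =>
    let cr := (PySem.Dict.ofList p.2).getD "controlread1" ""
    if PySem.Set.contains st.1 cr then st
    else (PySem.Set.add st.1 cr,
          samples.foldl (fun out q =>
            if (PySem.Dict.ofList q.2).getD "controlread1" "" == cr then out.insert q.1 p.1 else out) st.2)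
  (samples.foldl step ((PySem.Set.empty : PySem.Set String), PySem.Dict.empty)).2.items

-- ===== PRECONDITION & SPEC =====
-- Pre_ requires (a) distinct sample names — the list models a Python dict, which cannot hold
-- duplicate keys, so no Python-side behaviour exists for duplicates — and (b) every info dict
-- to carry the key 'controlread1', without which A raises KeyError.
def Pre_copy_control_samples (samples : List (String × List (String × String))) : Prop :=
  (samples.map Prod.fst).Nodup ∧ ∀ p ∈ samples, "controlread1" ∈ p.2.map Prod.fst
instance (samples : List (String × List (String × String))) : Decidable (Pre_copy_control_samples samples) := by unfold Pre_copy_control_samples; infer_instance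

def pvWitness_copy_control_samples : (List (String × List (String × String))) :=
  [("s1", [("controlread1", "c1"), ("read1", "r1")]),
   ("s2", [("controlread1", "c2")]),
   ("s3", [("controlread1", "c1")])]

def Spec_copy_control_samples (samples : List (String × List (String × String))) (out : List (String × String)) : Prop := out = copy_control_samples_alt samples
instance (samples : List (String × List (String × String))) (out : List (String × String)) : Decidable (Spec_copy_control_samples samples out) := by unfold Spec_copy_control_samples; infer_instance

-- ===== CLAIM (what is proved, stated in full; the proofs are below) =====
def Claim_equal_copy_control_samples : Prop := ∀ (samples : List (String × List (String × String))), Dom_copy_control_samples samples → Pre_copy_control_samples samples → Spec_copy_control_samples samples (copy_control_samples samples)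

-- ===== LEMMAS AND PROOFS =====

-- the control read of one item, the (sample-name) group of one control read, and the chunk of
-- output both programs produce for that group: every member paired with the group's first sample
def crOf (p : String × List (String × String)) : String :=
  (PySem.Dict.ofList p.2).getD "controlread1" ""
def gnames (samples : List (String × List (String × String))) (c : String) : List String :=
  (samples.filter (fun q => crOf q == c)).map Prod.fst
def blockOf (samples : List (String × List (String × String))) (c : String) : List (String × String) :=
  (gnames samples c).map (fun s => (s, PySem.List.pyGetD (gnames samples c) 0 ""))

lemma ofList_items (samples : List (String × List (String × String)))
    (hnd : (samples.map Prod.fst).Nodup) :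
    (PySem.Dict.ofList samples).items = samples := by
  have : PySem.Dict.ofList samples
      = samples.foldl (fun d p => d.insert p.1 p.2) PySem.Dict.empty := rfl
  rw [this]
  have h := PySem.Dict.items_foldl_insert_fresh samples Prod.fst Prod.snd PySem.Dict.empty
    (fun a _ => by simp [PySem.Dict.contains_empty]) hnd
  simpa using h

-- A's key expression equals crOf on the items themselves, given distinct sample names
lemma key_eq_crOf (samples : List (String × List (String × String)))
    (hnd : (samples.map Prod.fst).Nodup) (p : String × List (String × String)) (hp : p ∈ samples) :
    (PySem.Dict.ofList ((PySem.Dict.ofList samples).getD p.1 [])).getD "controlread1" "" = crOf p := by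
  have hkeys : (PySem.Dict.ofList samples).keys.Nodup := by
    simpa [PySem.Dict.keys, ofList_items samples hnd] using hnd
  have hm : (p.1, p.2) ∈ (PySem.Dict.ofList samples).items := by
    rw [ofList_items samples hnd]; exact hp
  have : (PySem.Dict.ofList samples).getD p.1 [] = p.2 :=
    PySem.Dict.getD_of_mem_items _ hm hkeys _
  rw [this]; rfl

-- the setdefault-style `if … then insert key []` before a modify-append is redundant
lemma insert_modify_eq_modify (d : PySem.Dict String (List String)) (key s : String) :
    ((if d.contains key then d else d.insert key []).modify key [] (fun g => g ++ [s]))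
      = d.modify key [] (fun g => g ++ [s]) := by
  by_cases h : d.contains key = true
  · simp [h]
  · have h' : d.contains key = false := by simpa using h
    simp only [h', Bool.false_eq_true, if_false, PySem.Dict.modify,
      PySem.Dict.getD_insert_self, PySem.Dict.insert_insert_self,
      PySem.Dict.getD_of_not_contains d [] h']

lemma mem_gnames (samples : List (String × List (String × String))) (c s : String) :
    s ∈ gnames samples c ↔ ∃ q ∈ samples, q.1 = s ∧ crOf q = c := by
  simp only [gnames, List.mem_map, List.mem_filter, beq_iff_eq]
  constructor
  · rintro ⟨a, ⟨ha, hc⟩, rfl⟩; exact ⟨_, ha, rfl, hc⟩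
  · rintro ⟨q, hq, rfl, hc⟩; exact ⟨q, ⟨hq, hc⟩, rfl⟩

lemma nodup_gnames (samples : List (String × List (String × String)))
    (hnd : (samples.map Prod.fst).Nodup) (c : String) : (gnames samples c).Nodup :=
  ((List.filter_sublist (l := samples)).map Prod.fst).nodup hnd

lemma fst_inj (samples : List (String × List (String × String)))
    (hnd : (samples.map Prod.fst).Nodup) {q q' : String × List (String × String)}
    (hq : q ∈ samples) (hq' : q' ∈ samples) (h : q.1 = q'.1) : q = q' :=
  List.inj_on_of_nodup_map hnd hq hq' h

-- the names collected over distinct control reads are pairwise distinct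
lemma nodup_flat_gnames (samples : List (String × List (String × String)))
    (hnd : (samples.map Prod.fst).Nodup) (cs : List String) (hcs : cs.Nodup) :
    (cs.flatMap (gnames samples)).Nodup := by
  rw [List.nodup_flatMap]
  refine ⟨fun c _ => nodup_gnames samples hnd c, ?_⟩
  refine hcs.pairwise_of_forall_ne ?_
  intro c hc c' hc' hne
  unfold Function.onFun
  rw [List.disjoint_left]
  intro s hs hs'
  obtain ⟨q, hq, rfl, hcq⟩ := (mem_gnames samples c s).mp hs
  obtain ⟨q', hq', he, hcq'⟩ := (mem_gnames samples c' q.1).mp hs'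
  have : q = q' := fst_inj samples hnd hq hq' he.symm
  exact hne (hcq ▸ this ▸ hcq')

-- A's second loop over the groups appends one output block per group
lemma A_second_loop (gs : List (String × List String)) :
    ∀ (rc : PySem.Dict String String),
    (∀ s ∈ gs.flatMap Prod.snd, rc.contains s = false) →
    (gs.flatMap Prod.snd).Nodup →
    (gs.foldl (fun rc q => q.2.foldl (fun rc s => rc.insert s (PySem.List.pyGetD q.2 0 "")) rc) rc).items
      = rc.items ++ gs.flatMap (fun q => q.2.map (fun s => (s, PySem.List.pyGetD q.2 0 ""))) := by
  induction gs with
  | nil => intro rc _ _; simp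
  | cons q gs ih =>
    intro rc hfresh hnd
    rw [List.flatMap_cons, List.nodup_append] at hnd
    have hf1 : ∀ s ∈ q.2, rc.contains s = false := fun s hs =>
      hfresh s (by rw [List.flatMap_cons, List.mem_append]; exact Or.inl hs)
    have hinner := PySem.Dict.items_foldl_insert_fresh q.2 (fun s => s)
      (fun _ => PySem.List.pyGetD q.2 0 "") rc hf1 (by simpa using hnd.1)
    simp only [List.foldl_cons] at *
    have hkeys' : (q.2.foldl (fun rc s => rc.insert s (PySem.List.pyGetD q.2 0 "")) rc).keys
        = rc.keys ++ q.2 := by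
      simp only [PySem.Dict.keys]
      rw [hinner]
      simp only [List.map_append, List.map_map]
      rw [show ((fun (x : String × String) => x.1) ∘ fun a => (a, PySem.List.pyGetD q.2 0 "")) = id from rfl, List.map_id]
    have hf2 : ∀ s ∈ gs.flatMap Prod.snd,
        (q.2.foldl (fun rc s => rc.insert s (PySem.List.pyGetD q.2 0 "")) rc).contains s = false := by
      intro s hs
      have h1 : rc.contains s = false := hfresh s (by rw [List.flatMap_cons, List.mem_append]; exact Or.inr hs)
      have h2 : s ∉ q.2 := fun hmem => hnd.2.2 s hmem s hs rfl
      rw [← Bool.not_eq_true, PySem.Dict.contains_iff_mem_keys, hkeys', List.mem_append]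
      rintro (h | h)
      · rw [← Bool.not_eq_true, PySem.Dict.contains_iff_mem_keys] at h1; exact h1 h
      · exact h2 h
    have hstep := ih (q.2.foldl (fun rc s => rc.insert s (PySem.List.pyGetD q.2 0 "")) rc) hf2 hnd.2.1
    rw [hstep, hinner]
    simp [List.flatMap_cons]

-- characterisation of A: one output block per distinct control read, in first-occurrence order
lemma A_items (samples : List (String × List (String × String)))
    (hnd : (samples.map Prod.fst).Nodup) :
    copy_control_samples samples
      = (PySem.Set.ofList (samples.map crOf)).flatMap (blockOf samples) := by
  unfold copy_control_samples
  simp only []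
  have h1 : samples.foldl (fun cr p =>
      let key := (PySem.Dict.ofList ((PySem.Dict.ofList samples).getD p.1 [])).getD "controlread1" ""
      let cr := if cr.contains key then cr else cr.insert key []
      cr.modify key [] (fun g => g ++ [p.1])) PySem.Dict.empty
    = samples.foldl (fun cr p => cr.modify (crOf p) [] (fun g => g ++ [p.1])) PySem.Dict.empty := by
    apply PySem.List.foldl_congr_mem
    intro acc p hp
    simp only [key_eq_crOf samples hnd p hp]
    exact insert_modify_eq_modify acc (crOf p) p.1
  rw [h1]
  set cr := samples.foldl (fun cr p => cr.modify (crOf p) [] (fun g => g ++ [p.1])) PySem.Dict.empty with hcr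
  have hkeys : cr.keys = PySem.Set.ofList (samples.map crOf) := by
    rw [hcr, PySem.Dict.keys_foldl_modify_key samples crOf [] (fun _ p => fun g => g ++ [p.1]) PySem.Dict.empty]
    rw [PySem.Dict.keys_empty, PySem.Set.update_nil_left]
  have hknd : cr.keys.Nodup := by
    rw [hcr]
    exact PySem.Dict.nodup_keys_foldl_modify_key samples crOf [] _ _ PySem.Dict.nodup_keys_empty
  have hgetD : ∀ c, cr.getD c [] = gnames samples c := by
    intro c
    rw [hcr, ← List.foldl_map
        (g := fun (d : PySem.Dict String (List String)) (pr : String × String) =>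
          d.modify pr.1 [] (fun g => g ++ [pr.2]))
        (f := fun (p : String × List (String × String)) => (crOf p, p.1))]
    rw [PySem.Dict.getD_foldl_modify_append]
    simp only [PySem.Dict.getD_empty, List.nil_append, List.filter_map, gnames]
    rw [List.map_map]
    rfl
  have hitems : cr.items = (PySem.Set.ofList (samples.map crOf)).map (fun c => (c, gnames samples c)) := by
    rw [PySem.Dict.items_eq_map_keys cr hknd [], hkeys]
    exact List.map_congr_left (fun c _ => by rw [hgetD c])
  rw [hitems]
  rw [A_second_loop _ PySem.Dict.empty
      (fun s _ => PySem.Dict.contains_empty s)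
      (by rw [List.flatMap_map]
          exact nodup_flat_gnames samples hnd _ (PySem.Set.nodup_ofList _))]
  rw [List.flatMap_map]
  show ([] : List (String × String)) ++ _ = _
  rw [List.nil_append]
  rfl

-- the keys present in a dict whose items are the blocks of `seen` are exactly their group names
lemma keys_of_items_blocks (samples : List (String × List (String × String)))
    (seen : PySem.Set String) (out : PySem.Dict String String)
    (hout : out.items = seen.flatMap (blockOf samples)) :
    out.keys = seen.flatMap (gnames samples) := by
  show out.items.map Prod.fst = _
  rw [hout, List.map_flatMap]
  congr 1
  funext c
  simp [blockOf, List.map_map, Function.comp_def]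

-- B's loop invariant: after any prefix, the output dict holds the blocks of the seen control reads
lemma B_loop (samples : List (String × List (String × String)))
    (hnd : (samples.map Prod.fst).Nodup) :
    ∀ (rest pre : List (String × List (String × String))) (seen : PySem.Set String)
      (out : PySem.Dict String String),
      samples = pre ++ rest →
      seen = PySem.Set.ofList (pre.map crOf) →
      out.items = seen.flatMap (blockOf samples) →
      ((rest.foldl (fun (st : PySem.Set String × PySem.Dict String String) p =>
          let cr := (PySem.Dict.ofList p.2).getD "controlread1" ""
          if PySem.Set.contains st.1 cr then st
          else (PySem.Set.add st.1 cr,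
                samples.foldl (fun out q =>
                  if (PySem.Dict.ofList q.2).getD "controlread1" "" == cr then out.insert q.1 p.1 else out) st.2))
        (seen, out)).2).items
        = (PySem.Set.ofList (samples.map crOf)).flatMap (blockOf samples) := by
  intro rest
  induction rest with
  | nil =>
    intro pre seen out hsplit hseen hout
    simp only [List.foldl_nil]
    rw [hout, hseen, hsplit, List.append_nil]
  | cons p rest' ih =>
    intro pre seen out hsplit hseen hout
    rw [List.foldl_cons]
    by_cases hc : PySem.Set.contains seen (crOf p) = true
    · have hstep : (let cr := (PySem.Dict.ofList p.2).getD "controlread1" ""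
          if PySem.Set.contains (seen, out).1 cr then (seen, out)
          else (PySem.Set.add (seen, out).1 cr,
                samples.foldl (fun out q =>
                  if (PySem.Dict.ofList q.2).getD "controlread1" "" == cr then out.insert q.1 p.1 else out) (seen, out).2)) = (seen, out) := by
        show (if PySem.Set.contains seen (crOf p) = true then _ else _) = (seen, out)
        rw [if_pos hc]
      rw [hstep]
      refine ih (pre ++ [p]) seen out (by rw [hsplit, List.append_assoc]; rfl) ?_ hout
      rw [List.map_append, List.map_singleton, PySem.Set.ofList_append_singleton, ← hseen,
        PySem.Set.add, if_pos hc]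
    · have hcmem : crOf p ∉ seen := fun h => hc ((PySem.Set.contains_iff _ _).mpr h)
      have hkeys := keys_of_items_blocks samples seen out hout
      -- the group of crOf p starts at p: nothing in pre carries it
      have hprefilter : pre.filter (fun q => crOf q == crOf p) = [] := by
        rw [List.filter_eq_nil_iff]
        intro q hq hbe
        apply hcmem
        rw [hseen, PySem.Set.mem_ofList]
        exact (beq_iff_eq.mp hbe) ▸ List.mem_map_of_mem hq
      have hgn : gnames samples (crOf p)
          = p.1 :: (rest'.filter (fun q => crOf q == crOf p)).map Prod.fst := by
        rw [gnames, hsplit, List.filter_append, hprefilter, List.nil_append,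
          List.filter_cons, if_pos (by simp)]
        rfl
      -- the inner rescan inserts exactly the block of crOf p, over fresh distinct keys
      have hfold : samples.foldl (fun out q =>
            if crOf q == crOf p then out.insert q.1 p.1 else out) out
          = (samples.filter (fun q => crOf q == crOf p)).foldl
              (fun out q => out.insert q.1 p.1) out := List.foldl_filter.symm
      have hfresh : ∀ q ∈ samples.filter (fun q => crOf q == crOf p), out.contains q.1 = false := by
        intro q hq
        rw [List.mem_filter] at hq
        rw [← Bool.not_eq_true, PySem.Dict.contains_iff_mem_keys, hkeys, List.mem_flatMap]
        rintro ⟨c', hc', hg⟩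
        obtain ⟨q', hq', he, hcq'⟩ := (mem_gnames samples c' q.1).mp hg
        have : q' = q := fst_inj samples hnd hq' hq.1 he
        apply hcmem
        have h1 : crOf q = crOf p := beq_iff_eq.mp hq.2
        have h2 : crOf q' = crOf q := by rw [this]
        rw [← h1, ← h2, hcq']
        exact hc'
      have hinner := PySem.Dict.items_foldl_insert_fresh
        (samples.filter (fun q => crOf q == crOf p)) Prod.fst (fun _ => p.1) out hfresh
        (by exact nodup_gnames samples hnd (crOf p))
      have hout' : (samples.foldl (fun out q =>
            if crOf q == crOf p then out.insert q.1 p.1 else out) out).items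
          = (seen.add (crOf p)).flatMap (blockOf samples) := by
        rw [hfold, hinner, hout, PySem.Set.add, if_neg hc, List.flatMap_append]
        congr 1
        simp only [List.flatMap_cons, List.flatMap_nil, List.append_nil, blockOf, hgn]
        simp only [List.map_cons]
        rw [hsplit, List.filter_append, hprefilter, List.nil_append, List.filter_cons,
          if_pos (by simp), List.map_cons]
        simp [PySem.List.pyGetD_zero_cons, List.map_map, Function.comp_def]
      have hstep : (let cr := (PySem.Dict.ofList p.2).getD "controlread1" ""
          if PySem.Set.contains (seen, out).1 cr then (seen, out)
          else (PySem.Set.add (seen, out).1 cr,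
                samples.foldl (fun out q =>
                  if (PySem.Dict.ofList q.2).getD "controlread1" "" == cr then out.insert q.1 p.1 else out) (seen, out).2))
          = (seen.add (crOf p),
             samples.foldl (fun out q => if crOf q == crOf p then out.insert q.1 p.1 else out) out) := by
        show (if PySem.Set.contains seen (crOf p) = true then _ else _) = _
        rw [if_neg hc]
        rfl
      rw [hstep]
      refine ih (pre ++ [p]) _ _ (by rw [hsplit, List.append_assoc]; rfl) ?_ hout'
      rw [List.map_append, List.map_singleton, PySem.Set.ofList_append_singleton, ← hseen]

-- characterisation of B: the same blocks in the same order
lemma B_items (samples : List (String × List (String × String)))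
    (hnd : (samples.map Prod.fst).Nodup) :
    copy_control_samples_alt samples
      = (PySem.Set.ofList (samples.map crOf)).flatMap (blockOf samples) := by
  unfold copy_control_samples_alt
  simp only []
  exact B_loop samples hnd samples [] PySem.Set.empty PySem.Dict.empty rfl rfl rfl

-- ===== VERDICT (by name: the statement is the Claim_ definition above) =====
theorem copy_control_samples_spec : Claim_equal_copy_control_samples := by
  intro samples _ hpre
  unfold Spec_copy_control_samples
  rw [A_items samples hpre.1, B_items samples hpre.1]
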